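-- pv_equiv track=rewrite | github.com/kebathan/diglossia | variants.py | h_g
-- ===== SOURCE A (Python) =====
-- def h_g(text):
--
--     vowels = ("a", "e", "i", "o", "u")
--     idx = 0
--
--     store = text
--
--     while text[idx+1:].find("h") != -1:
--
--         idx += text[idx:].find("h")
--
--         if idx > 0 and idx < len(text) - 1:
--             if text[idx-1] in vowels and text[idx+1] in vowels:
--                 text = text[:idx] + "g" + text[idx+1:]
--             else:
--                 idx += 1
--         else:
--             idx += 1
--
--         if idx+1 >= len(text):
--             break
--
--     return text if text != store else None
-- ===== SOURCE B (Python) =====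
-- def h_g(text):
--
--     vowels = ("a", "e", "i", "o", "u")
--
--     if len(text) < 3:
--         return None
--
--     mid = "".join(
--         "g" if b == "h" and a in vowels and c in vowels else b
--         for a, b, c in zip(text, text[1:], text[2:])
--     )
--     new = text[0] + mid + text[-1]
--
--     return new if new != text else None
-- ===== Notes on version B (the rewrite author's own statement) =====
-- stated objective: faster
-- what changed: A repeatedly re-scans the string with find() and rebuilds it by slicing at every replacement; B makes a single linear pass over windows of three characters (zip of text with its two shifts), replacing each intervocalic 'h' by 'g' and comparing the result once.
import Mathlib
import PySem

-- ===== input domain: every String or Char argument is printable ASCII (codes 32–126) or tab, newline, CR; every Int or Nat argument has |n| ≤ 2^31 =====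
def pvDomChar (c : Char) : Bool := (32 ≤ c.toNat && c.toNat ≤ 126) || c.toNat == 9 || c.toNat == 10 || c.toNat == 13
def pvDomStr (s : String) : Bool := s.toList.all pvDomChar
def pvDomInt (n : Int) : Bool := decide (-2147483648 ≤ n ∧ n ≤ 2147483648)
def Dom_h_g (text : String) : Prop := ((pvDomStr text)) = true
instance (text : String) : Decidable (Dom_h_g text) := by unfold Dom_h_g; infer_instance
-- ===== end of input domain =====

-- B replaces A's repeated find()/slice rescans by one linear three-character-window pass (return value only; neither mutates).

-- ===== PORT A =====
-- vowels = ("a", "e", "i", "o", "u")  (one-character strings ↔ Char)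
def hgVowels : List Char := ['a', 'e', 'i', 'o', 'u']

-- the while-loop of A; fuel 2*len+2 bounds the iteration count (each iteration
-- removes an 'h' or advances idx); on exhaustion (unreachable) returns text.
def hgLoop : Nat → List Char → Int → List Char
  | 0, text, _ => text
  | fuel+1, text, idx =>
    -- while text[idx+1:].find("h") != -1:
    if PySem.Chars.find (PySem.List.slice text (some (idx+1)) none) ['h'] ≠ -1 then
      -- idx += text[idx:].find("h")
      let idx2 := idx + PySem.Chars.find (PySem.List.slice text (some idx) none) ['h']
      if 0 < idx2 ∧ idx2 < (text.length : Int) - 1 then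
        -- text[idx-1], text[idx+1]: in range in this branch, so pyGetD is exact
        if hgVowels.contains (PySem.List.pyGetD text (idx2 - 1) ' ')
            ∧ hgVowels.contains (PySem.List.pyGetD text (idx2 + 1) ' ') then
          -- text = text[:idx] + "g" + text[idx+1:]
          let text2 := PySem.List.slice text none (some idx2) ++ ['g']
                        ++ PySem.List.slice text (some (idx2 + 1)) none
          if idx2 + 1 ≥ (text2.length : Int) then text2 else hgLoop fuel text2 idx2
        else
          if (idx2 + 1) + 1 ≥ (text.length : Int) then text else hgLoop fuel text (idx2 + 1)
      else
        if (idx2 + 1) + 1 ≥ (text.length : Int) then text else hgLoop fuel text (idx2 + 1)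
    else text

def h_g (text : String) : Option String :=
  let cs := text.toList
  let res := hgLoop (2 * cs.length + 2) cs 0
  -- return text if text != store else None
  if res ≠ cs then some (String.ofList res) else none

-- ===== PORT B =====
-- "g" if b == "h" and a in vowels and c in vowels else b, over zip(text, text[1:], text[2:])
def midRepl : List Char → List Char
  | a :: b :: c :: rest =>
      (if b = 'h' ∧ hgVowels.contains a ∧ hgVowels.contains c then 'g' else b)
        :: midRepl (b :: c :: rest)
  | _ => []

def h_g_alt (text : String) : Option String :=
  let cs := text.toList
  if cs.length < 3 then none
  else
    -- new = text[0] + mid + text[-1]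
    let newL := cs.headD ' ' :: (midRepl cs ++ [cs.getLastD ' '])
    -- return new if new != text else None
    if newL ≠ cs then some (String.ofList newL) else none

-- ===== PRECONDITION & SPEC =====
def Spec_h_g (text : String) (out : Option String) : Prop := out = h_g_alt text
instance (text : String) (out : Option String) : Decidable (Spec_h_g text out) := by unfold Spec_h_g; infer_instance

-- ===== CLAIM (what is proved, stated in full; the proofs are below) =====
def Claim_equal_h_g : Prop := ∀ (text : String), Dom_h_g text → Spec_h_g text (h_g text)

-- ===== LEMMAS AND PROOFS =====

-- 'j is an intervocalic h of cs' (proof-side only)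
def ivocB (cs : List Char) (j : Nat) : Bool :=
  decide (0 < j ∧ j + 1 < cs.length ∧ cs.getD j ' ' = 'h'
    ∧ hgVowels.contains (cs.getD (j - 1) ' ') = true
    ∧ hgVowels.contains (cs.getD (j + 1) ' ') = true)

-- cs with every intervocalic h replaced by g (proof-side spec)
def Rmap (cs : List Char) : List Char :=
  (List.range cs.length).map (fun j => if ivocB cs j then 'g' else cs.getD j ' ')

theorem length_Rmap (cs : List Char) : (Rmap cs).length = cs.length := by
  simp [Rmap]

theorem getElem_Rmap (cs : List Char) (j : Nat) (h : j < (Rmap cs).length) :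
    (Rmap cs)[j] = if ivocB cs j then 'g' else cs.getD j ' ' := by
  simp [Rmap]

theorem Rmap_eq_self (cs : List Char) (h : ∀ j, ivocB cs j = false) : Rmap cs = cs := by
  apply List.ext_getElem (length_Rmap cs)
  intro j h1 h2
  rw [getElem_Rmap cs j h1, h j, if_neg (by simp), List.getD_eq_getElem cs ' ' h2]

theorem Rmap_short (cs : List Char) (h : cs.length < 3) : Rmap cs = cs := by
  apply Rmap_eq_self
  intro j
  simp only [ivocB, decide_eq_false_iff_not]
  rintro ⟨h1, h2, -⟩
  omega

-- getD to getElem?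
theorem getD_eq_some_h {cs : List Char} {j : Nat} (hj : j < cs.length)
    (h : cs.getD j ' ' = 'h') : cs[j]? = some 'h' := by
  rw [List.getD_eq_getElem cs ' ' hj] at h
  rw [List.getElem?_eq_getElem hj, h]

-- singleton prefix
theorem single_prefix {a : Char} {l : List Char} : [a] <+: l ↔ l[0]? = some a := by
  constructor
  · rintro ⟨t, rfl⟩; rfl
  · intro h
    cases l with
    | nil => simp at h
    | cons x t => simp at h; exact ⟨t, by simp [h]⟩

-- find on a list containing 'h'
theorem find_h (s : List Char) (hs : 'h' ∈ s) :
    ∃ k : Nat, PySem.Chars.find s ['h'] = (k : Int) ∧ k < s.length ∧ s[k]? = some 'h'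
      ∧ ∀ q, q < k → s[q]? ≠ some 'h' := by
  have hinf : ['h'] <:+: s := (List.singleton_infix_iff 'h' s).mpr hs
  have h0 : 0 ≤ PySem.Chars.find s ['h'] := (PySem.Chars.find_nonneg_iff s ['h']).mpr hinf
  obtain ⟨hpre, hmin⟩ := PySem.Chars.find_spec (s := s) (sub := ['h']) h0
  have hget : s[(PySem.Chars.find s ['h']).toNat]? = some 'h' := by
    have := single_prefix.mp hpre
    rw [List.getElem?_drop] at this
    simpa using this
  refine ⟨(PySem.Chars.find s ['h']).toNat, by omega, ?_, hget, ?_⟩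
  · obtain ⟨hlt, -⟩ := List.getElem?_eq_some_iff.mp hget
    exact hlt
  · intro q hq hcon
    refine hmin q hq (single_prefix.mpr ?_)
    rw [List.getElem?_drop]
    simpa using hcon

-- no 'h' at or after position n
theorem no_h_drop {cs : List Char} {n : Nat} (h : 'h' ∉ cs.drop n) :
    ∀ j, n ≤ j → cs[j]? ≠ some 'h' := by
  intro j hj hcon
  apply h
  have e : n + (j - n) = j := by omega
  have : (cs.drop n)[j - n]? = some 'h' := by
    rw [List.getElem?_drop, e, hcon]
  exact List.mem_of_getElem? this

-- cs.drop p starts with the h at p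
theorem drop_cons_h {cs : List Char} {p : Nat} (hplt : p < cs.length)
    (hpget : cs[p]? = some 'h') : cs.drop p = 'h' :: cs.drop (p + 1) := by
  have h2 : cs[p] = 'h' := by
    have := List.getElem?_eq_getElem hplt
    rw [hpget] at this
    exact (Option.some.injEq _ _).mp this.symm
  rw [List.drop_eq_getElem_cons hplt, h2]

-- ===== the replacement step =====

theorem length_repl (cs : List Char) (p : Nat) (hp : p < cs.length) :
    (cs.take p ++ ['g'] ++ cs.drop (p+1)).length = cs.length := by
  simp; omega

theorem getElem?_repl (cs : List Char) (p : Nat) (hp : p < cs.length) (j : Nat) :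
    (cs.take p ++ ['g'] ++ cs.drop (p+1))[j]? = if j = p then some 'g' else cs[j]? := by
  have ht : (cs.take p).length = p := by rw [List.length_take]; omega
  rcases Nat.lt_trichotomy j p with hlt | rfl | hgt
  · rw [if_neg (by omega)]
    rw [List.getElem?_append_left (by simp [ht] <;> omega)]
    rw [List.getElem?_append_left (by rw [ht]; exact hlt)]
    try rw [List.getElem?_take_of_lt hlt]
  · rw [if_pos rfl, List.getElem?_append_left (by simp [ht] <;> omega),
      List.getElem?_append_right (by rw [ht])]
    rw [ht]
    simp
  · rw [if_neg (by omega), List.getElem?_append_right (by simp [ht] <;> omega)]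
    rw [List.getElem?_drop]
    congr 1
    simp [ht]
    omega

theorem getD_repl (cs : List Char) (p : Nat) (hp : p < cs.length) (j : Nat) :
    (cs.take p ++ ['g'] ++ cs.drop (p+1)).getD j ' ' = if j = p then 'g' else cs.getD j ' ' := by
  rw [List.getD_eq_getElem?_getD, getElem?_repl cs p hp j]
  split_ifs <;> simp [List.getD_eq_getElem?_getD]

theorem vowel_repl (cs : List Char) (p : Nat) (hp : p < cs.length)
    (hH : cs.getD p ' ' = 'h') (j : Nat) :
    hgVowels.contains ((cs.take p ++ ['g'] ++ cs.drop (p+1)).getD j ' ')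
      = hgVowels.contains (cs.getD j ' ') := by
  rw [getD_repl cs p hp j]
  by_cases hj : j = p
  · subst hj; rw [if_pos rfl, hH]; decide
  · rw [if_neg hj]

theorem ivocB_repl (cs : List Char) (p : Nat) (hp : p < cs.length)
    (hH : cs.getD p ' ' = 'h') (j : Nat) :
    ivocB (cs.take p ++ ['g'] ++ cs.drop (p+1)) j = if j = p then false else ivocB cs j := by
  by_cases hj : j = p
  · subst hj
    rw [if_pos rfl]
    simp only [ivocB, decide_eq_false_iff_not]
    rintro ⟨-, -, hg, -⟩
    rw [getD_repl cs j hp j, if_pos rfl] at hg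
    exact absurd hg (by decide)
  · rw [if_neg hj]
    simp only [ivocB, length_repl cs p hp, getD_repl cs p hp j, if_neg hj,
      vowel_repl cs p hp hH]

theorem Rmap_repl (cs : List Char) (p : Nat) (hp : p < cs.length)
    (hivoc : ivocB cs p = true) :
    Rmap (cs.take p ++ ['g'] ++ cs.drop (p+1)) = Rmap cs := by
  have hH : cs.getD p ' ' = 'h' := by
    simp only [ivocB, decide_eq_true_eq] at hivoc
    exact hivoc.2.2.1
  apply List.ext_getElem (by rw [length_Rmap, length_Rmap, length_repl cs p hp])
  intro j h1 h2
  rw [getElem_Rmap _ j h1, getElem_Rmap _ j h2, ivocB_repl cs p hp hH j,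
    getD_repl cs p hp j]
  by_cases hj : j = p
  · subst hj; rw [if_pos rfl, if_pos rfl, if_neg (by simp), if_pos hivoc]
  · rw [if_neg hj, if_neg hj]

theorem drop_repl (cs : List Char) (p : Nat) (hp : p < cs.length) :
    (cs.take p ++ ['g'] ++ cs.drop (p+1)).drop p = 'g' :: cs.drop (p+1) := by
  apply List.ext_getElem?
  intro i
  rw [List.getElem?_drop, getElem?_repl cs p hp (p + i)]
  cases i with
  | zero => rw [if_pos (by omega)]; rfl
  | succ i =>
    rw [if_neg (by omega)]
    show cs[p + (i+1)]? = (cs.drop (p+1))[i]?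
    rw [List.getElem?_drop]
    congr 1
    omega

-- ===== main loop lemma =====

theorem hgLoop_eq (fuel : Nat) : ∀ (cs : List Char) (idx : Nat),
    (cs.drop idx).count 'h' + (cs.length - idx) ≤ fuel →
    (∀ j, j ≤ idx → ivocB cs j = false) →
    hgLoop fuel cs (idx : Int) = Rmap cs := by
  induction fuel with
  | zero =>
    intro cs idx hfuel hinv
    show cs = Rmap cs
    refine (Rmap_eq_self cs ?_).symm
    intro j
    by_cases hj : j ≤ idx
    · exact hinv j hj
    · simp only [ivocB, decide_eq_false_iff_not]
      rintro ⟨-, h2, -⟩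
      omega
  | succ fuel ih =>
    intro cs idx hfuel hinv
    simp only [hgLoop]
    have hsA : PySem.List.slice cs (some ((idx : Int) + 1)) none = cs.drop (idx + 1) := by
      rw [show ((idx : Int) + 1) = ((idx + 1 : Nat) : Int) by push_cast; ring,
        PySem.List.slice_from_natCast]
    have hsB : PySem.List.slice cs (some ((idx : Int))) none = cs.drop idx :=
      PySem.List.slice_from_natCast cs idx
    simp only [hsA, hsB]
    by_cases hc : PySem.Chars.find (cs.drop (idx+1)) ['h'] = -1
    · rw [if_neg (not_not_intro hc)]
      refine (Rmap_eq_self cs ?_).symm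
      intro j
      by_cases hj : j ≤ idx
      · exact hinv j hj
      · have hnoh : 'h' ∉ cs.drop (idx+1) := by
          intro hmem
          exact (PySem.Chars.find_eq_neg_one_iff _ _).mp hc
            ((List.singleton_infix_iff 'h' _).mpr hmem)
        simp only [ivocB, decide_eq_false_iff_not]
        rintro ⟨-, h2, h3, -⟩
        exact no_h_drop hnoh j (by omega) (getD_eq_some_h (by omega) h3)
    · rw [if_pos hc]
      have hmem1 : 'h' ∈ cs.drop (idx+1) := by
        have := (PySem.Chars.find_ne_neg_one_iff (cs.drop (idx+1)) ['h']).mp hc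
        exact (List.singleton_infix_iff 'h' _).mp this
      have hmem : 'h' ∈ cs.drop idx := by
        have he : cs.drop (idx+1) = (cs.drop idx).drop 1 := by rw [List.drop_drop]
        rw [he] at hmem1
        exact List.mem_of_mem_drop hmem1
      obtain ⟨k, hkeq, hklt, hkget, hkmin⟩ := find_h (cs.drop idx) hmem
      rw [hkeq]
      set p := idx + k with hp_def
      have hplt : p < cs.length := by
        have := List.length_drop (l := cs) (i := idx)
        omega
      have hpget : cs[p]? = some 'h' := by
        rw [← List.getElem?_drop]; exact hkget
      have hpgetD : cs.getD p ' ' = 'h' := by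
        rw [List.getD_eq_getElem?_getD, hpget]; rfl
      have hmid : ∀ q, idx ≤ q → q < p → cs.getD q ' ' ≠ 'h' := by
        intro q hq1 hq2 hcon
        have hqlt : q < cs.length := by omega
        refine hkmin (q - idx) (by omega) ?_
        rw [List.getElem?_drop, Nat.add_sub_cancel' hq1]
        exact getD_eq_some_h hqlt hcon
      have hcast : (idx : Int) + (k : Int) = ((p : Nat) : Int) := by omega
      simp only [hcast]
      have hdp : cs.drop p = 'h' :: cs.drop (p + 1) := drop_cons_h hplt hpget
      have hc2 : (cs.drop p).count 'h' ≤ (cs.drop idx).count 'h' := by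
        have he : cs.drop p = (cs.drop idx).drop k := by
          rw [List.drop_drop]
        rw [he]
        exact List.Sublist.count_le (a := 'h') (List.drop_sublist _ _)
      -- the common 'skip' continuation
      have hskip : ivocB cs p = false →
          (if ((p : Int) + 1) + 1 ≥ (cs.length : Int) then cs
           else hgLoop fuel cs ((p : Int) + 1)) = Rmap cs := by
        intro hivp
        have hinv' : ∀ j, j ≤ p + 1 → ivocB cs j = false := by
          intro j hj
          by_cases hj1 : j ≤ idx
          · exact hinv j hj1
          · by_cases hj2 : j < p
            · simp only [ivocB, decide_eq_false_iff_not]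
              rintro ⟨-, -, h3, -⟩
              exact hmid j (by omega) hj2 h3
            · by_cases hj3 : j = p
              · rw [hj3]; exact hivp
              · have hj4 : j = p + 1 := by omega
                subst hj4
                simp only [ivocB, decide_eq_false_iff_not]
                rintro ⟨-, -, -, h4, -⟩
                rw [Nat.add_sub_cancel, hpgetD] at h4
                exact absurd h4 (by decide)
        by_cases hbr : (p : Int) + 1 + 1 ≥ (cs.length : Int)
        · rw [if_pos hbr]
          refine (Rmap_eq_self cs ?_).symm
          intro j
          by_cases hj : j ≤ p + 1
          · exact hinv' j hj
          · simp only [ivocB, decide_eq_false_iff_not]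
            rintro ⟨-, h2, -⟩
            omega
        · rw [if_neg hbr]
          rw [show ((p : Int) + 1) = ((p + 1 : Nat) : Int) by push_cast; ring]
          apply ih cs (p + 1) _ hinv'
          have hc1 : (cs.drop p).count 'h' = (cs.drop (p+1)).count 'h' + 1 := by
            rw [hdp, List.count_cons_self]
          omega
      by_cases hb : 0 < p ∧ p + 1 < cs.length
      · rw [if_pos (show (0 : Int) < (p : Int) ∧ (p : Int) < (cs.length : Int) - 1 by omega)]
        have hg1 : PySem.List.pyGetD cs ((p : Int) - 1) ' ' = cs.getD (p - 1) ' ' := by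
          rw [show ((p : Int) - 1) = ((p - 1 : Nat) : Int) by omega, PySem.List.pyGetD_natCast]
        have hg2 : PySem.List.pyGetD cs ((p : Int) + 1) ' ' = cs.getD (p + 1) ' ' := by
          rw [show ((p : Int) + 1) = ((p + 1 : Nat) : Int) by push_cast; ring,
            PySem.List.pyGetD_natCast]
        simp only [hg1, hg2]
        by_cases hv : hgVowels.contains (cs.getD (p-1) ' ') = true
            ∧ hgVowels.contains (cs.getD (p+1) ' ') = true
        · rw [if_pos hv]
          have hivoc : ivocB cs p = true := by
            simp only [ivocB, decide_eq_true_eq]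
            exact ⟨hb.1, hb.2, hpgetD, hv.1, hv.2⟩
          have hsl1 : PySem.List.slice cs none (some ((p : Nat) : Int)) = cs.take p := by
            rw [PySem.List.slice_to_natCast]
          have hsl2 : PySem.List.slice cs (some ((p : Int) + 1)) none = cs.drop (p + 1) := by
            rw [show ((p : Int) + 1) = ((p + 1 : Nat) : Int) by push_cast; ring,
              PySem.List.slice_from_natCast]
          simp only [hsl1, hsl2]
          set cs' := cs.take p ++ ['g'] ++ cs.drop (p+1) with hcs'
          have hlen' : cs'.length = cs.length := length_repl cs p hplt
          rw [if_neg (by rw [hlen']; omega)]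
          have hres : hgLoop fuel cs' ((p : Nat) : Int) = Rmap cs' := by
            apply ih cs' p
            · have hdropcs' : cs'.drop p = 'g' :: cs.drop (p+1) := drop_repl cs p hplt
              have hc1 : (cs'.drop p).count 'h' + 1 = (cs.drop p).count 'h' := by
                rw [hdropcs', hdp, List.count_cons_self, List.count_cons_of_ne (by decide)]
              rw [hlen']
              omega
            · intro j hj
              rw [ivocB_repl cs p hplt hpgetD j]
              by_cases hjp : j = p
              · rw [if_pos hjp]
              · rw [if_neg hjp]
                by_cases hj1 : j ≤ idx
                · exact hinv j hj1
                · simp only [ivocB, decide_eq_false_iff_not]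
                  rintro ⟨-, -, h3, -⟩
                  exact hmid j (by omega) (by omega) h3
          rw [hres, Rmap_repl cs p hplt hivoc]
        · rw [if_neg hv]
          apply hskip
          simp only [ivocB, decide_eq_false_iff_not]
          rintro ⟨-, -, -, h4, h5⟩
          exact hv ⟨h4, h5⟩
      · rw [if_neg (by omega)]
        apply hskip
        simp only [ivocB, decide_eq_false_iff_not]
        rintro ⟨h1, h2, -⟩
        exact hb ⟨h1, h2⟩

-- ===== B's assembled string is Rmap =====

theorem length_midRepl : ∀ cs : List Char, (midRepl cs).length = cs.length - 2
  | [] => rfl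
  | [_] => rfl
  | [_, _] => rfl
  | a :: b :: c :: rest => by
      have ih := length_midRepl (b :: c :: rest)
      simp only [midRepl, List.length_cons] at ih ⊢
      omega
termination_by cs => cs.length

theorem ivocB_cons (a : Char) (tl : List Char) (j : Nat) (hj : 1 ≤ j) :
    ivocB (a :: tl) (j + 1) = ivocB tl j := by
  obtain ⟨i, rfl⟩ : ∃ i, j = i + 1 := ⟨j - 1, by omega⟩
  simp only [ivocB, decide_eq_decide, List.getD_cons_succ, List.length_cons,
    Nat.add_sub_cancel]
  constructor
  · rintro ⟨-, h2, h3, h4, h5⟩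
    exact ⟨by omega, by omega, h3, h4, h5⟩
  · rintro ⟨-, h2, h3, h4, h5⟩
    exact ⟨by omega, by omega, h3, h4, h5⟩

theorem ivocB_one (a b c : Char) (rest : List Char) :
    ivocB (a :: b :: c :: rest) 1
      = decide (b = 'h' ∧ hgVowels.contains a = true ∧ hgVowels.contains c = true) := by
  simp only [ivocB, decide_eq_decide, List.getD_cons_succ, List.getD_cons_zero,
    List.length_cons, Nat.sub_self]
  constructor
  · rintro ⟨-, -, h3, h4, h5⟩
    exact ⟨h3, h4, h5⟩
  · rintro ⟨h3, h4, h5⟩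
    exact ⟨by omega, by omega, h3, h4, h5⟩

theorem midRepl_getElem : ∀ (cs : List Char) (i : Nat) (h : i < (midRepl cs).length),
    (midRepl cs)[i] = if ivocB cs (i + 1) then 'g' else cs.getD (i + 1) ' '
  | a :: b :: c :: rest, 0, h => by
    simp only [midRepl, List.getElem_cons_zero, ivocB_one a b c rest]
    by_cases hcond : b = 'h' ∧ hgVowels.contains a = true ∧ hgVowels.contains c = true
    · rw [if_pos hcond, if_pos (by simpa using hcond)]
    · rw [if_neg hcond, if_neg (by simpa using hcond)]
      rfl
  | a :: b :: c :: rest, i + 1, h => by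
    have hlt : i < (midRepl (b :: c :: rest)).length := by
      simp only [midRepl, List.length_cons] at h
      omega
    have ih := midRepl_getElem (b :: c :: rest) i hlt
    simp only [midRepl, List.getElem_cons_succ]
    rw [ih, ivocB_cons a (b :: c :: rest) (i + 1) (by omega)]
    rfl
  | [], _, h => by simp [midRepl] at h
  | [_], _, h => by simp [midRepl] at h
  | [_, _], _, h => by simp [midRepl] at h
termination_by cs => cs.length

theorem alt_eq_Rmap (cs : List Char) (h : 3 ≤ cs.length) :
    cs.headD ' ' :: (midRepl cs ++ [cs.getLastD ' ']) = Rmap cs := by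
  have hmidlen : (midRepl cs).length = cs.length - 2 := length_midRepl cs
  apply List.ext_getElem (by rw [length_Rmap]; simp [hmidlen]; omega)
  intro j h1 h2
  rw [getElem_Rmap cs j h2]
  match j, h1, h2 with
  | 0, h1, h2 =>
    rw [List.getElem_cons_zero, if_neg (by simp [ivocB])]
    cases cs with
    | nil => simp at h
    | cons x t => rfl
  | j + 1, h1, h2 =>
    rw [List.getElem_cons_succ]
    have hjlen : j + 1 < cs.length := by rwa [length_Rmap] at h2
    by_cases hjl : j < (midRepl cs).length
    · rw [List.getElem_append_left hjl, midRepl_getElem cs j hjl]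
    · have hj : j = (midRepl cs).length := by
        simp only [List.length_cons, List.length_append] at h1
        omega
      have hjval : j + 1 = cs.length - 1 := by omega
      rw [List.getElem_append_right (by omega)]
      simp only [hj, Nat.sub_self, List.getElem_singleton]
      rw [if_neg (by
        simp only [ivocB, decide_eq_true_eq]
        rintro ⟨-, h2', -⟩
        omega)]
      rw [List.getLastD_eq_getLast?, List.getLast?_eq_getElem?, List.getD_eq_getElem?_getD]
      have e : (midRepl cs).length + 1 = cs.length - 1 := by omega
      rw [e]

-- ===== VERDICT (by name: the statement is the Claim_ definition above) =====
theorem h_g_spec : Claim_equal_h_g := by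
  intro text _
  show h_g text = h_g_alt text
  simp only [h_g, h_g_alt]
  have hloop : hgLoop (2 * text.toList.length + 2) text.toList 0 = Rmap text.toList := by
    have := hgLoop_eq (2 * text.toList.length + 2) text.toList 0
      (by have := List.count_le_length (l := text.toList.drop 0) (a := 'h')
          simp only [List.drop_zero] at this ⊢
          omega)
      (by intro j hj
          have : j = 0 := by omega
          subst this
          simp [ivocB])
    simpa using this
  simp only [hloop]
  by_cases hlen : text.toList.length < 3
  · rw [if_pos hlen]
    simp only [Rmap_short text.toList hlen]
    simp
  · rw [if_neg hlen]
    simp only [← alt_eq_Rmap text.toList (by omega)]
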